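-- pv_equiv track=rewrite | github.com/rhinos07/FleetManager | agv-simulator/simulator.py | pick_start_nodes
-- ===== SOURCE A (Python) =====
-- def pick_start_nodes(nodes: dict, count: int) -> list[str]:
--     """
--     Distributes AGV start positions across charging and IN stations, preferring
--     unique nodes so that vehicles do not block each other at startup.
--     Falls back to any available node if none match those prefixes.
--     """
--     preferred = [nid for nid in nodes if nid.upper().startswith(("CHG", "IN-", "IN_"))]
--     if not preferred:
--         preferred = list(nodes.keys())
--     all_node_ids = list(nodes.keys())
--
--     result: list[str] = []
--     used: set[str] = set()
--     for _ in range(count):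
--         # Prefer unique preferred nodes, then unique any node, then cycle preferred
--         candidates = (
--             [n for n in preferred if n not in used]
--             or [n for n in all_node_ids if n not in used]
--             or preferred
--         )
--         node = candidates[0]
--         used.add(node)
--         result.append(node)
--     return result
-- ===== SOURCE B (Python) =====
-- def pick_start_nodes(nodes: dict, count: int) -> list[str]:
--     preferred = [nid for nid in nodes if nid.upper().startswith(("CHG", "IN-", "IN_"))]
--     if not preferred:
--         preferred = list(nodes)
--     # preferred-first ordering, deduplicated once (preferred keys, then the rest)
--     ordered = list(dict.fromkeys(preferred + list(nodes)))
--     if count <= len(ordered):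
--         return ordered[:max(count, 0)]
--     return ordered + [preferred[0]] * (count - len(ordered))
-- ===== Notes on version B (the rewrite author's own statement) =====
-- stated objective: faster
-- what changed: B builds the preferred-first ordering once (preferred keys, then the remaining keys, deduplicated) and returns a slice of it, padded with preferred[0] when count exceeds the number of distinct nodes, instead of A's per-iteration filtered scans over a growing 'used' set.
import Mathlib
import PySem

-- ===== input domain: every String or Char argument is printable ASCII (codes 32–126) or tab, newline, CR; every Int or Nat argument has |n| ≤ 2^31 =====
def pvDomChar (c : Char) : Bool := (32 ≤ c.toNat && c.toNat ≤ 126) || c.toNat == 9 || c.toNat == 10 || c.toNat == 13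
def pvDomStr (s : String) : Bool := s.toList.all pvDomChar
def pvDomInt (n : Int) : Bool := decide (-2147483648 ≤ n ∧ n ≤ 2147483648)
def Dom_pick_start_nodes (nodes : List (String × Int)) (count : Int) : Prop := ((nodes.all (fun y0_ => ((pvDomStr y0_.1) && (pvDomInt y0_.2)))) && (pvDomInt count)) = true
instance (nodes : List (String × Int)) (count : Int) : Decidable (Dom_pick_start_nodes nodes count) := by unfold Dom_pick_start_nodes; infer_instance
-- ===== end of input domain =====

-- B replaces A's per-iteration candidate scans with one preferred-first dedup pass plus slice-and-pad.
-- Both Pythons receive `nodes` as a dict; the ports receive the association list and take its keys in first-occurrence order.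

-- ===== PORT A =====
-- nid.upper().startswith(("CHG", "IN-", "IN_")) — the comprehension's predicate, identical in both Pythons
def pvPrefOK (nid : String) : Bool :=
  PySem.Str.startswith (PySem.Str.upper nid) "CHG" ||
  PySem.Str.startswith (PySem.Str.upper nid) "IN-" ||
  PySem.Str.startswith (PySem.Str.upper nid) "IN_"

def pick_start_nodes (nodes : List (String × Int)) (count : Int) : List String :=
  let keys := PySem.Dict.keys (PySem.Dict.ofList nodes)
  let preferred0 := keys.filter pvPrefOK
  let preferred := if preferred0.isEmpty then keys else preferred0
  let all_node_ids := keys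
  let st := (PySem.List.pyRange 0 count 1).foldl
    (fun (st : List String × PySem.Set String) _ =>
      let c1 := preferred.filter (fun n => !(PySem.Set.contains st.2 n))
      let c2 := all_node_ids.filter (fun n => !(PySem.Set.contains st.2 n))
      let candidates := if !c1.isEmpty then c1 else if !c2.isEmpty then c2 else preferred
      -- candidates[0]: the IndexError on empty candidates (only when nodes = [] ∧ count > 0) is excluded by Pre_
      let node := candidates.headD ""
      (st.1 ++ [node], PySem.Set.add st.2 node))
    ([], PySem.Set.empty)
  st.1

-- ===== PORT B =====
def pick_start_nodes_alt (nodes : List (String × Int)) (count : Int) : List String :=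
  let keys := PySem.Dict.keys (PySem.Dict.ofList nodes)
  let preferred0 := keys.filter pvPrefOK
  let preferred := if preferred0.isEmpty then keys else preferred0
  let ordered := PySem.List.dedup (preferred ++ keys)
  if count ≤ ordered.length then
    PySem.List.slice ordered none (some (max count 0))
  else
    -- preferred[0]: the IndexError on empty preferred (only when nodes = [] ∧ count > 0) is excluded by Pre_
    ordered ++ List.replicate (count - ordered.length).toNat (preferred.headD "")

-- ===== PRECONDITION & SPEC =====
-- Pre_ excludes only nodes = [] with count > 0, where BOTH programs raise IndexError (A at candidates[0], B at preferred[0]).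
def Pre_pick_start_nodes (nodes : List (String × Int)) (count : Int) : Prop := nodes ≠ [] ∨ count ≤ 0
instance (nodes : List (String × Int)) (count : Int) : Decidable (Pre_pick_start_nodes nodes count) := by unfold Pre_pick_start_nodes; infer_instance
def pvWitness_pick_start_nodes : (List (String × Int)) × Int := ([("CHG-1", 0), ("A", 1), ("IN-2", 2)], 5)

def Spec_pick_start_nodes (nodes : List (String × Int)) (count : Int) (out : List String) : Prop := out = pick_start_nodes_alt nodes count
instance (nodes : List (String × Int)) (count : Int) (out : List String) : Decidable (Spec_pick_start_nodes nodes count out) := by unfold Spec_pick_start_nodes; infer_instance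

-- ===== CLAIM (what is proved, stated in full; the proofs are below) =====
def Claim_equal_pick_start_nodes : Prop := ∀ (nodes : List (String × Int)) (count : Int), Dom_pick_start_nodes nodes count → Pre_pick_start_nodes nodes count → Spec_pick_start_nodes nodes count (pick_start_nodes nodes count)

-- ===== LEMMAS AND PROOFS =====

-- A's `preferred` list, as a function of the key list
def pvP (K : List String) : List String :=
  let p := K.filter pvPrefOK
  if p.isEmpty then K else p

-- the tail of the preferred-first ordering: keys not already preferred
def pvF (K : List String) : List String := K.filter (fun y => !(y ∈ pvP K : Bool))

-- the body of A's for-loop, as a function of the key list and the (result, used) state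
def pvStep (K : List String) (st : List String × PySem.Set String) : List String × PySem.Set String :=
  let preferred := pvP K
  let c1 := preferred.filter (fun n => !(PySem.Set.contains st.2 n))
  let c2 := K.filter (fun n => !(PySem.Set.contains st.2 n))
  let candidates := if !c1.isEmpty then c1 else if !c2.isEmpty then c2 else preferred
  let node := candidates.headD ""
  (st.1 ++ [node], PySem.Set.add st.2 node)

lemma pvP_nodup {K : List String} (hK : K.Nodup) : (pvP K).Nodup := by
  unfold pvP; dsimp only; split
  · exact hK
  · exact hK.filter _

lemma pvP_ne_nil {K : List String} (hne : K ≠ []) : pvP K ≠ [] := by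
  unfold pvP; dsimp only; split
  · exact hne
  · next h => intro hc; rw [hc] at h; simp at h

lemma mem_pvF_not_mem_pvP {K : List String} {x : String} (hx : x ∈ pvF K) : x ∉ pvP K := by
  have := List.of_mem_filter hx
  simpa using this

-- list(dict.fromkeys(preferred + all_node_ids)) = preferred ++ (keys not preferred)
lemma dedup_eq (K : List String) (hK : K.Nodup) :
    PySem.List.dedup (pvP K ++ K) = pvP K ++ pvF K := by
  rw [PySem.List.dedup_eq_ofList, PySem.Set.ofList_append, PySem.Set.update_eq_append_filter,
    PySem.Set.ofList_eq_self_of_nodup _ (pvP_nodup hK), PySem.Set.ofList_eq_self_of_nodup _ hK]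
  unfold pvF
  simp

lemma pvO_nodup {K : List String} (hK : K.Nodup) : (pvP K ++ pvF K).Nodup := by
  rw [List.nodup_append]
  exact ⟨pvP_nodup hK, hK.filter _, fun x hxP y hyF he => mem_pvF_not_mem_pvP hyF (he ▸ hxP)⟩

-- filter "not yet used" of a Nodup list, when the used elements are exactly L.take n, is L.drop n
lemma filter_not_mem_take {L : List String} (h : L.Nodup) (n : Nat) :
    L.filter (fun x => !(x ∈ L.take n : Bool)) = L.drop n := by
  induction L generalizing n with
  | nil => simp
  | cons a t ih =>
    cases n with
    | zero => simp
    | succ n =>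
      simp only [List.take_succ_cons, List.drop_succ_cons, List.filter_cons]
      rw [if_neg (by simp)]
      rw [List.filter_congr (q := fun x => !(x ∈ t.take n : Bool)) ?_, ih h.of_cons n]
      intro x hx
      have hxa : x ≠ a := fun he => (List.nodup_cons.mp h).1 (he ▸ hx)
      simp [hxa]

lemma getElem_not_mem_take (l : List String) (h : l.Nodup) (n : Nat) (hn : n < l.length) :
    l[n] ∉ l.take n := by
  intro hmem
  obtain ⟨i, hi, hig⟩ := List.mem_iff_getElem.mp hmem
  rw [List.getElem_take] at hig
  have hilt : i < n := (by simpa using hi : i < n ∧ i < l.length).1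
  exact absurd (List.nodup_iff_getElem?_ne_getElem?.mp h i n hilt hn)
    (by simp [hn, Nat.lt_of_lt_of_le hilt (Nat.le_of_lt hn), hig])

-- the first unique-preferred candidate scan
lemma c1_eq {K : List String} (hK : K.Nodup) (n : Nat) :
    (pvP K).filter (fun x => !(x ∈ (pvP K ++ pvF K).take n : Bool)) = (pvP K).drop n := by
  rw [List.take_append]
  rw [List.filter_congr (q := fun x => !(x ∈ (pvP K).take n : Bool)) ?_]
  · exact filter_not_mem_take (pvP_nodup hK) n
  · intro x hx
    have hxF : x ∉ (pvF K).take (n - (pvP K).length) :=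
      fun h => mem_pvF_not_mem_pvP (List.mem_of_mem_take h) hx
    simp [List.mem_append, hxF]

-- the second unique-any candidate scan, once all preferred nodes are used
lemma c2_eq {K : List String} (hK : K.Nodup) (n : Nat) (hn : (pvP K).length ≤ n) :
    K.filter (fun x => !(x ∈ (pvP K ++ pvF K).take n : Bool)) = (pvF K).drop (n - (pvP K).length) := by
  rw [List.take_append, List.take_of_length_le hn]
  rw [List.filter_congr
      (q := fun x => (!(x ∈ ((pvF K).take (n - (pvP K).length)) : Bool)) && !(x ∈ pvP K : Bool))
      (by intro x _; simp [List.mem_append]; exact Bool.and_comm _ _)]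
  rw [← List.filter_filter]
  exact filter_not_mem_take (hK.filter _) (n - (pvP K).length)

-- one loop iteration advances the invariant state
lemma step_eq {K : List String} (hK : K.Nodup) (hne : K ≠ []) (n : Nat) :
    pvStep K ((pvP K ++ pvF K).take n ++ List.replicate (n - (pvP K ++ pvF K).length) ((pvP K).headD ""),
              (pvP K ++ pvF K).take n)
    = ((pvP K ++ pvF K).take (n+1) ++ List.replicate (n+1 - (pvP K ++ pvF K).length) ((pvP K).headD ""),
       (pvP K ++ pvF K).take (n+1)) := by
  have hOn := pvO_nodup hK
  unfold pvStep
  simp only [PySem.Set.contains_eq_listContains, List.contains_eq_mem]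
  rw [c1_eq hK n]
  by_cases h1 : n < (pvP K).length
  · -- still inside the preferred block
    have hO : n < (pvP K ++ pvF K).length := by simp [List.length_append]; omega
    have hc1 : (pvP K).drop n ≠ [] := by simp [List.drop_eq_nil_iff]; omega
    rw [if_pos (by simpa [List.isEmpty_iff] using hc1)]
    rw [List.drop_eq_getElem_cons h1]
    have hget : (pvP K)[n] = (pvP K ++ pvF K)[n]'hO := (List.getElem_append_left h1).symm
    have hnm : (pvP K ++ pvF K)[n]'hO ∉ (pvP K ++ pvF K).take n :=
      getElem_not_mem_take _ hOn n hO
    have htake : (pvP K ++ pvF K).take (n+1) = (pvP K ++ pvF K).take n ++ [(pvP K ++ pvF K)[n]'hO] := by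
      rw [List.take_add_one]; simp [List.getElem?_eq_getElem hO]
    simp only [List.headD_cons, hget]
    rw [PySem.Set.add_of_not_mem hnm]
    have hr1 : n - (pvP K ++ pvF K).length = 0 := by omega
    have hr2 : n + 1 - (pvP K ++ pvF K).length = 0 := by omega
    simp only [hr1, hr2, List.replicate_zero, List.append_nil]
    rw [htake]
  · have h1' : (pvP K).length ≤ n := Nat.le_of_not_lt h1
    have hc1 : (pvP K).drop n = [] := List.drop_eq_nil_iff.mpr (by omega)
    rw [hc1, if_neg (by simp)]
    rw [c2_eq hK n h1']
    by_cases h2 : n < (pvP K ++ pvF K).length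
    · -- preferred exhausted, still unique keys left
      have hj : n - (pvP K).length < (pvF K).length := by
        have := List.length_append (as := pvP K) (bs := pvF K); omega
      have hc2 : (pvF K).drop (n - (pvP K).length) ≠ [] := by simp [List.drop_eq_nil_iff]; omega
      rw [if_pos (by simpa [List.isEmpty_iff] using hc2)]
      rw [List.drop_eq_getElem_cons hj]
      have hget : (pvF K)[n - (pvP K).length] = (pvP K ++ pvF K)[n]'h2 := by
        rw [List.getElem_append_right h1']
      have hnm : (pvP K ++ pvF K)[n]'h2 ∉ (pvP K ++ pvF K).take n :=
        getElem_not_mem_take _ hOn n h2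
      have htake : (pvP K ++ pvF K).take (n+1) = (pvP K ++ pvF K).take n ++ [(pvP K ++ pvF K)[n]'h2] := by
        rw [List.take_add_one]; simp [List.getElem?_eq_getElem h2]
      simp only [List.headD_cons, hget]
      rw [PySem.Set.add_of_not_mem hnm]
      have hr1 : n - (pvP K ++ pvF K).length = 0 := by omega
      have hr2 : n + 1 - (pvP K ++ pvF K).length = 0 := by omega
      simp only [hr1, hr2, List.replicate_zero, List.append_nil]
      rw [htake]
    · -- every key used: keep appending the first preferred node
      have h2' : (pvP K ++ pvF K).length ≤ n := Nat.le_of_not_lt h2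
      have hc2 : (pvF K).drop (n - (pvP K).length) = [] := by
        rw [List.drop_eq_nil_iff]
        have := List.length_append (as := pvP K) (bs := pvF K); omega
      rw [hc2, if_neg (by simp)]
      obtain ⟨p, P', hP⟩ := List.exists_cons_of_ne_nil (pvP_ne_nil hne)
      have hhd : (pvP K).headD "" = p := by rw [hP]; rfl
      have hmem : (pvP K).headD "" ∈ pvP K ++ pvF K := by
        rw [hhd]; exact List.mem_append_left _ (hP ▸ List.mem_cons_self)
      have htk : ∀ m, (pvP K ++ pvF K).length ≤ m → (pvP K ++ pvF K).take m = pvP K ++ pvF K :=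
        fun m hm => List.take_of_length_le hm
      rw [htk n h2', htk (n+1) (by omega)]
      rw [PySem.Set.add_of_mem hmem]
      have hr : n + 1 - (pvP K ++ pvF K).length = (n - (pvP K ++ pvF K).length) + 1 := by omega
      rw [hr, List.replicate_succ', ← List.append_assoc]

-- a foldl whose body ignores the list element is an iterate
lemma foldl_const {α β : Type} (g : β → β) (l : List α) (init : β) :
    l.foldl (fun s _ => g s) init = g^[l.length] init := by
  induction l generalizing init with
  | nil => rfl
  | cons a t ih => simp [ih, Function.iterate_succ_apply]

-- the loop invariant: after n iterations the result is ordered[:n] padded with preferred[0]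
lemma loop_inv {K : List String} (hK : K.Nodup) (hne : K ≠ []) (n : Nat) :
    (pvStep K)^[n] ([], PySem.Set.empty)
    = ((pvP K ++ pvF K).take n ++ List.replicate (n - (pvP K ++ pvF K).length) ((pvP K).headD ""),
       (pvP K ++ pvF K).take n) := by
  induction n with
  | zero => simp [PySem.Set.empty]
  | succ n ih => rw [Function.iterate_succ_apply', ih, step_eq hK hne n]

lemma keys_ofList_eq (nodes : List (String × Int)) :
    (PySem.Dict.ofList nodes).keys = PySem.Set.ofList (nodes.map (·.1)) := by
  simp [PySem.Dict.ofList, PySem.Dict.update, PySem.Dict.keys_foldl_insert_key, PySem.Set.update_nil_left]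

-- ===== VERDICT (by name: the statement is the Claim_ definition above) =====
theorem pick_start_nodes_spec : Claim_equal_pick_start_nodes := by
  intro nodes count _ hpre
  unfold Spec_pick_start_nodes
  rcases eq_or_ne nodes [] with hnil | hne
  · -- empty dict: Pre_ forces count ≤ 0, both sides are []
    have hc : count ≤ 0 := hpre.resolve_left (by simp [hnil])
    subst hnil
    have hr : PySem.List.pyRange 0 count 1 = [] := PySem.List.pyRange_one_eq_nil hc
    have hk0 : (PySem.Dict.ofList ([] : List (String × Int))).keys = [] := rfl
    simp [pick_start_nodes, pick_start_nodes_alt, hr, hc, hk0,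
      PySem.List.slice_to _ (le_refl (0:Int))]
  · -- nonempty dict
    have hK : ((PySem.Dict.ofList nodes).keys).Nodup := PySem.Dict.nodup_keys_ofList nodes
    have hKne : (PySem.Dict.ofList nodes).keys ≠ [] := by
      obtain ⟨p, rest, hp⟩ := List.exists_cons_of_ne_nil hne
      rw [keys_ofList_eq]
      exact List.ne_nil_of_mem ((PySem.Set.mem_ofList _ p.1).mpr (by simp [hp]))
    set K := (PySem.Dict.ofList nodes).keys with hKdef
    -- A's loop, via the invariant
    have hA : pick_start_nodes nodes count
        = ((pvStep K)^[(PySem.List.pyRange 0 count 1).length] ([], PySem.Set.empty)).1 := by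
      show (List.foldl (fun st (_ : Int) => pvStep K st) ([], PySem.Set.empty)
        (PySem.List.pyRange 0 count 1)).1 = _
      rw [foldl_const]
    have hlen : (PySem.List.pyRange 0 count 1).length = count.toNat := by
      rw [PySem.List.length_pyRange_one]; omega
    rw [hA, hlen, loop_inv hK hKne]
    -- B, with the dedup evaluated
    have hB : pick_start_nodes_alt nodes count
        = (if count ≤ ((PySem.List.dedup (pvP K ++ K) : List String)).length then
            PySem.List.slice (PySem.List.dedup (pvP K ++ K)) none (some (max count 0))
          else
            PySem.List.dedup (pvP K ++ K)
              ++ List.replicate (count - ((PySem.List.dedup (pvP K ++ K) : List String)).length).toNat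
                  ((pvP K).headD "")) := rfl
    rw [hB, dedup_eq K hK]
    by_cases hcmp : count ≤ ((pvP K ++ pvF K : List String)).length
    · rw [if_pos hcmp]
      have hLsum : (pvP K ++ pvF K).length = (pvP K).length + (pvF K).length := List.length_append
      have h1 : count.toNat - ((pvP K).length + (pvF K).length) = 0 := by omega
      rw [PySem.List.slice_to _ (by omega : (0:Int) ≤ max count 0)]
      have h2 : (max count 0).toNat = count.toNat := by omega
      simp [h1, h2]
    · rw [if_neg hcmp]
      rw [not_le] at hcmp
      have h1 : (pvP K ++ pvF K).length ≤ count.toNat := by omega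
      have h2 : (count - ((pvP K ++ pvF K : List String)).length).toNat
          = count.toNat - (pvP K ++ pvF K).length := by omega
      rw [List.take_of_length_le h1, h2]
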